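-- pv_equiv track=rewrite | github.com/rolandtolnay/session-index | hooks/session_start.py | _format_cross_project
-- ===== SOURCE A (Python) =====
-- def _format_cross_project(sessions: list[dict]) -> list[str]:
--     """Group cross-project sessions into compact index lines."""
--     groups: dict[str, list[dict]] = {}
--     for s in sessions:
--         proj = s.get("project", "unknown")
--         groups.setdefault(proj, []).append(s)
--
--     lines = []
--     MAX_BRANCHES = 2
--     for project, sess_list in groups.items():
--         count = len(sess_list)
--         branches = sorted(set(s.get("branch", "") for s in sess_list if s.get("branch")))
--         if not branches:
--             branch_str = "unknown"
--         elif len(branches) <= MAX_BRANCHES: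
--             branch_str = ", ".join(branches)
--         else:
--             branch_str = ", ".join(branches[:MAX_BRANCHES]) + f" +{len(branches) - MAX_BRANCHES} more"
--         count_str = f"{count} session{'s' if count > 1 else ''}"
--         lines.append(f"- {project} — {count_str} ({branch_str})")
--     return lines
-- ===== SOURCE B (Python) =====
-- def _format_cross_project(sessions: list[dict]) -> list[str]:
--     """Group cross-project sessions into compact index lines.
--
--     Worklist partition: repeatedly take the first remaining session's project,
--     split the worklist into that project's sessions and the rest, format one
--     line from the split-off group, and continue on the rest (no dict at all)."""
--     MAX_BRANCHES = 2
--     lines = []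
--     remaining = list(sessions)
--     while remaining:
--         proj = remaining[0].get("project", "unknown")
--         same = [s for s in remaining if s.get("project", "unknown") == proj]
--         remaining = [s for s in remaining if s.get("project", "unknown") != proj]
--         count = len(same)
--         branches = sorted({s.get("branch", "") for s in same if s.get("branch")})
--         if not branches:
--             branch_str = "unknown"
--         elif len(branches) <= MAX_BRANCHES:
--             branch_str = ", ".join(branches)
--         else:
--             branch_str = ", ".join(branches[:MAX_BRANCHES]) + f" +{len(branches) - MAX_BRANCHES} more"
--         count_str = f"{count} session{'s' if count > 1 else ''}"
--         lines.append(f"- {proj} — {count_str} ({branch_str})")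
--     return lines
-- ===== Notes on version B (the rewrite author's own statement) =====
-- stated objective: alternative
-- what changed: B uses no dictionary at all: a worklist-partition loop repeatedly takes the first remaining session's project, splits the worklist into that project's group and the rest, formats the group's line immediately, and loops on the rest, instead of A's hash-grouping pass followed by a formatting pass over dict items.
import Mathlib
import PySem

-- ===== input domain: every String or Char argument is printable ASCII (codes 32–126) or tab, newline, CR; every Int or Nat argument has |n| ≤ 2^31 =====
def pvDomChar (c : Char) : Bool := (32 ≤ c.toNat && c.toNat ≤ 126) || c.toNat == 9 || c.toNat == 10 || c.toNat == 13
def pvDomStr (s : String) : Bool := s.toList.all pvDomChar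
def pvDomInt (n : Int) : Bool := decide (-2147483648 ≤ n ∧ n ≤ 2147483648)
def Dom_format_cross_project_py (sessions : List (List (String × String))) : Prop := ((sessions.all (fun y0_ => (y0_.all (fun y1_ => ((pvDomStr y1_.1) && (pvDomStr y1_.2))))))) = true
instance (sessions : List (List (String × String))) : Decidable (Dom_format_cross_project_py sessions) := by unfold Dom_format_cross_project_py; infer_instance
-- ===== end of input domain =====

-- B replaces A's dict-grouping + items pass with a dict-free worklist-partition loop
-- (take first project, split the worklist, format, recurse); same output (objective: alternative).

-- ===== PORT A =====
def format_cross_project_py (sessions : List (List (String × String))) : List String :=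
  let groups : PySem.Dict String (List (List (String × String))) :=
    sessions.foldl (fun groups s =>
      groups.modify ((PySem.Dict.mk s).getD "project" "unknown") [] (fun l => l ++ [s]))
      (PySem.Dict.mk [])
  groups.items.foldl (fun lines pr =>
    let project := pr.1
    let sess_list := pr.2
    let count : Int := sess_list.length
    let branches : List String :=
      PySem.List.sorted (PySem.Set.ofList (sess_list.filterMap (fun s =>
        let b := (PySem.Dict.mk s).getD "branch" ""
        if b = "" then none else some b))) (fun x => x) false
    let branch_str :=
      if branches = [] then "unknown"
      else if branches.length ≤ 2 then PySem.Str.join ", " branches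
      else PySem.Str.join ", " (branches.take 2) ++ " +" ++
           PySem.Int.toStr ((branches.length : Int) - 2) ++ " more"
    let count_str := PySem.Int.toStr count ++ " session" ++ (if count > 1 then "s" else "")
    lines ++ ["- " ++ project ++ " — " ++ count_str ++ " (" ++ branch_str ++ ")"]) []

-- ===== PORT B =====
-- one session's project key
def pvKey (s : List (String × String)) : String :=
  (PySem.Dict.mk s).getD "project" "unknown"

-- format one line from a project's group of sessions
def pvLine (proj : String) (same : List (List (String × String))) : String :=
  let count : Int := same.length
  let branches : List String :=
    PySem.List.sorted (PySem.Set.ofList (same.filterMap (fun s =>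
      let b := (PySem.Dict.mk s).getD "branch" ""
      if b = "" then none else some b))) (fun x => x) false
  let branch_str :=
    if branches = [] then "unknown"
    else if branches.length ≤ 2 then PySem.Str.join ", " branches
    else PySem.Str.join ", " (branches.take 2) ++ " +" ++
         PySem.Int.toStr ((branches.length : Int) - 2) ++ " more"
  let count_str := PySem.Int.toStr count ++ " session" ++ (if count > 1 then "s" else "")
  "- " ++ proj ++ " — " ++ count_str ++ " (" ++ branch_str ++ ")"

-- B's while-loop: partition the worklist on its head's project, emit, continue
def pvLoop : List (List (String × String)) → List String → List String
  | [], lines => lines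
  | s :: t, lines =>
    let proj := pvKey s
    let same := (s :: t).filter (fun x => pvKey x == proj)
    let remaining := (s :: t).filter (fun x => !(pvKey x == proj))
    pvLoop remaining (lines ++ [pvLine proj same])
termination_by l _ => l.length
decreasing_by
  simp only [List.filter_cons, beq_self_eq_true, Bool.not_true, Bool.false_eq_true,
    if_neg, reduceIte]
  exact Nat.lt_succ_of_le (List.length_filter_le _ _)

def format_cross_project_py_alt (sessions : List (List (String × String))) : List String :=
  pvLoop sessions []

-- ===== PRECONDITION & SPEC =====
def Spec_format_cross_project_py (sessions : List (List (String × String))) (out : List String) : Prop := out = format_cross_project_py_alt sessions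
instance (sessions : List (List (String × String))) (out : List String) : Decidable (Spec_format_cross_project_py sessions out) := by unfold Spec_format_cross_project_py; infer_instance

-- ===== CLAIM =====
def Claim_equal_format_cross_project_py : Prop := ∀ (sessions : List (List (String × String))), Dom_format_cross_project_py sessions → Spec_format_cross_project_py sessions (format_cross_project_py sessions)

-- ===== LEMMAS AND PROOFS =====

-- A's result as "first-seen distinct projects, each formatted from its filtered group"
def pvF (l : List (List (String × String))) : List String :=
  (PySem.Set.ofList (l.map pvKey)).map (fun k => pvLine k (l.filter (fun x => pvKey x == k)))

-- appending-singletons foldl is map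
theorem pv_foldl_append_map {α β : Type} (f : α → β) (l : List α) (a : List β) :
    l.foldl (fun acc x => acc ++ [f x]) a = a ++ l.map f := by
  induction l generalizing a with
  | nil => simp
  | cons x t ih => simp [List.foldl_cons, ih, List.append_assoc]

-- the value a modify-loop leaves at key k is the fold of the step over the matching elements
theorem pv_getD_foldl_modify {β ν : Type}
    (l : List β) (key : β → String) (d0 : ν) (g : β → ν → ν)
    (d : PySem.Dict String ν) (k : String) :
    (l.foldl (fun d s => d.modify (key s) d0 (g s)) d).getD k d0 =
      (l.filter (fun s => key s == k)).foldl (fun r s => g s r) (d.getD k d0) := by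
  induction l generalizing d with
  | nil => simp
  | cons s t ih =>
    simp only [List.foldl_cons, List.filter_cons]
    by_cases h : key s = k
    · simp [h, ih]
    · have hne : (key s == k) = false := by simp [h]
      simp [hne, ih, PySem.Dict.getD_modify, Ne.symm h]

-- items of a modify-loop from the empty dict: first-seen keys, each with its folded value
theorem pv_items_foldl_modify {β ν : Type}
    (l : List β) (key : β → String) (d0 : ν) (g : β → ν → ν) :
    (l.foldl (fun d s => d.modify (key s) d0 (g s)) (PySem.Dict.mk [])).items =
      (PySem.Set.ofList (l.map key)).map (fun k =>
        (k, (l.filter (fun s => key s == k)).foldl (fun r s => g s r) d0)) := by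
  have hk : (l.foldl (fun d s => d.modify (key s) d0 (g s)) (PySem.Dict.mk [])).keys =
      PySem.Set.update (PySem.Dict.mk ([] : List (String × ν))).keys (l.map key) :=
    PySem.Dict.keys_foldl_modify_key l key d0 (fun _ s => g s) (PySem.Dict.mk [])
  have hnd : (l.foldl (fun d s => d.modify (key s) d0 (g s)) (PySem.Dict.mk [])).keys.Nodup :=
    PySem.Dict.nodup_keys_foldl_modify_key l key d0 (fun _ s => g s) (PySem.Dict.mk [])
      (by simp [PySem.Dict.keys])
  rw [PySem.Dict.items_eq_map_keys _ hnd d0, hk]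
  have hupd : PySem.Set.update (PySem.Dict.mk ([] : List (String × ν))).keys (l.map key) =
      PySem.Set.ofList (l.map key) := rfl
  rw [hupd]
  refine List.map_congr_left (fun k _ => ?_)
  rw [pv_getD_foldl_modify l key d0 g (PySem.Dict.mk []) k]
  simp [PySem.Dict.getD, PySem.Dict.get?]

-- folding add over xs skips every element already in the accumulator
theorem pv_foldl_add_skip {α : Type} [BEq α] [LawfulBEq α] (a : α) (xs : List α) (d : PySem.Set α)
    (ha : a ∈ d) :
    xs.foldl PySem.Set.add d = (xs.filter (fun x => !(x == a))).foldl PySem.Set.add d := by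
  induction xs generalizing d with
  | nil => rfl
  | cons x t ih =>
    simp only [List.foldl_cons, List.filter_cons]
    by_cases h : x = a
    · subst h
      rw [PySem.Set.add_of_mem ha]
      simpa using ih d ha
    · have hb : (!(x == a)) = true := by simp [h]
      rw [hb]
      simp only [List.foldl_cons]
      exact ih _ (by rw [PySem.Set.add_eq_ite]; split <;> simp [ha])

-- folding add from (a :: d) when no element equals a keeps a in front
theorem pv_foldl_add_cons {α : Type} [BEq α] [LawfulBEq α] (a : α) (xs : List α) (d : PySem.Set α)
    (hxs : ∀ x ∈ xs, x ≠ a) :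
    xs.foldl PySem.Set.add (a :: d) = a :: xs.foldl PySem.Set.add d := by
  induction xs generalizing d with
  | nil => rfl
  | cons x t ih =>
    simp only [List.foldl_cons]
    have hx : x ≠ a := hxs x (by simp)
    have ht : ∀ y ∈ t, y ≠ a := fun y hy => hxs y (by simp [hy])
    rw [PySem.Set.add_eq_ite, PySem.Set.add_eq_ite (s := d)]
    by_cases h : x ∈ d
    · rw [if_pos (by simp [h]), if_pos h]; exact ih d ht
    · rw [if_neg (by simp [h, hx]), if_neg h]
      simpa using ih (d ++ [x]) ht

-- ofList of a cons: head, then ofList of the tail with the head's duplicates removed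
theorem pv_ofList_cons_filter {α : Type} [BEq α] [LawfulBEq α] (a : α) (xs : List α) :
    PySem.Set.ofList (a :: xs) = a :: PySem.Set.ofList (xs.filter (fun x => !(x == a))) := by
  have h0 : PySem.Set.ofList (a :: xs) = xs.foldl PySem.Set.add [a] := by
    rw [PySem.Set.ofList_eq_foldl]
    simp only [List.foldl_cons]
    rw [PySem.Set.add_eq_ite]
    simp
  rw [h0, pv_foldl_add_skip a xs [a] (by simp),
      pv_foldl_add_cons a _ [] (by intro x hx; simp at hx; simpa using hx.2),
      PySem.Set.ofList_eq_foldl]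

-- B's loop computes acc ++ pvF
theorem pv_loop_eq (l : List (List (String × String))) (acc : List String) :
    pvLoop l acc = acc ++ pvF l := by
  induction l, acc using pvLoop.induct with
  | case1 lines => simp [pvLoop, pvF]
  | case2 s t lines proj same remaining ih =>
    rw [pvLoop]
    rw [ih, List.append_assoc]
    congr 1
    show [pvLine proj same] ++ pvF remaining = pvF (s :: t)
    have hrem : remaining = t.filter (fun x => !(pvKey x == proj)) := by
      simp [remaining, proj]
    have hsame : same = (s :: t).filter (fun x => pvKey x == proj) := rfl
    unfold pvF
    have hmapcons : (s :: t).map pvKey = proj :: t.map pvKey := rfl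
    rw [hmapcons, pv_ofList_cons_filter, List.map_cons]
    have hfm : (t.map pvKey).filter (fun x => !(x == proj)) = remaining.map pvKey := by
      rw [hrem, List.filter_map]; rfl
    rw [hfm, List.singleton_append]
    congr 1
    refine List.map_congr_left (fun k hk => ?_)
    have hkne : k ≠ proj := by
      have hk' : k ∈ remaining.map pvKey := (PySem.Set.mem_ofList _ _).mp hk
      obtain ⟨x, hx, rfl⟩ := List.mem_map.mp hk'
      rw [hrem] at hx
      have := List.of_mem_filter hx
      simpa using this
    congr 1
    have h1 : (s :: t).filter (fun x => pvKey x == k) = t.filter (fun x => pvKey x == k) := by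
      simp [List.filter_cons, show pvKey s = proj from rfl, Ne.symm hkne]
    have h2 : remaining.filter (fun x => pvKey x == k) = t.filter (fun x => pvKey x == k) := by
      rw [hrem, List.filter_filter]
      refine List.filter_congr (fun x _ => ?_)
      by_cases hx : pvKey x = k
      · simp [hx, Ne.symm hkne]
        exact hkne
      · simp [hx]
    rw [h1, h2]

-- ===== VERDICT =====
theorem format_cross_project_py_spec : Claim_equal_format_cross_project_py := by
  intro sessions _
  show format_cross_project_py sessions = format_cross_project_py_alt sessions
  unfold format_cross_project_py format_cross_project_py_alt
  dsimp only
  rw [pv_foldl_append_map, List.nil_append, pv_loop_eq, List.nil_append]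
  rw [pv_items_foldl_modify sessions (fun s => (PySem.Dict.mk s).getD "project" "unknown") []
        (fun s l => l ++ [s]), List.map_map]
  unfold pvF
  refine List.map_congr_left (fun k _ => ?_)
  have happ : ∀ (t a : List (List (String × String))),
      List.foldl (fun r s => r ++ [s]) a t = a ++ t := by
    intro t; induction t with
    | nil => simp
    | cons y u ihu => intro a; simp [List.foldl_cons, ihu, List.append_assoc]
  simp only [Function.comp, happ, List.nil_append, pvLine, pvKey]
  rfl
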